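-- pv_equiv track=rewrite | github.com/MrBrantCode/unitest_baseline | mut_generate/mist_train_taco/taco_18211/solution.py | calculate_square_sums
-- ===== SOURCE A (Python) =====
-- def calculate_square_sums(N, K, A):
--     modN = 10**9 + 7
--     S_1 = 0
--     S_2 = 0
--     S_3 = 0
--
--     # Initialize the first window
--     for i in range(K):
--         S_3 = (S_3 + A[i]) % modN
--         S_2 = (S_2 + (i + 1) * A[i]) % modN
--         S_1 = (S_1 + (i + 1)**2 * A[i]) % modN
--
--     output = [S_1]
--
--     # Slide the window across the array
--     for i in range(N - K):
--         S_1 = (S_1 + (K + 1)**2 * A[K + i] - 2 * (S_2 + (K + 1) * A[K + i]) + S_3 + A[K + i]) % modN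
--         output.append(S_1)
--         S_2 = (S_2 + (K + 1) * A[K + i] - (S_3 + A[K + i])) % modN
--         S_3 = (S_3 + A[K + i] - A[i]) % modN
--
--     return output
-- ===== SOURCE B (Python) =====
-- def calculate_square_sums(N, K, A):
--     modN = 10**9 + 7
--     first = sum((i + 1) ** 2 * A[i] for i in range(K)) % modN
--     output = [first]
--     for j in range(1, N - K + 1):
--         output.append(sum((i + 1) ** 2 * A[j + i] for i in range(K)) % modN)
--     return output
-- ===== Notes on version B (the rewrite author's own statement) =====
-- stated objective: simpler
-- what changed: B recomputes each window's weighted square sum directly from the array instead of maintaining the incremental running sums S_1/S_2/S_3 of A's sliding-window recurrence.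
-- outside the precondition, e.g. on calculate_square_sums(1, -1, [3, 4]): A returns [0, 4, 16], B returns [0, 0, 0]
import Mathlib
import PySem

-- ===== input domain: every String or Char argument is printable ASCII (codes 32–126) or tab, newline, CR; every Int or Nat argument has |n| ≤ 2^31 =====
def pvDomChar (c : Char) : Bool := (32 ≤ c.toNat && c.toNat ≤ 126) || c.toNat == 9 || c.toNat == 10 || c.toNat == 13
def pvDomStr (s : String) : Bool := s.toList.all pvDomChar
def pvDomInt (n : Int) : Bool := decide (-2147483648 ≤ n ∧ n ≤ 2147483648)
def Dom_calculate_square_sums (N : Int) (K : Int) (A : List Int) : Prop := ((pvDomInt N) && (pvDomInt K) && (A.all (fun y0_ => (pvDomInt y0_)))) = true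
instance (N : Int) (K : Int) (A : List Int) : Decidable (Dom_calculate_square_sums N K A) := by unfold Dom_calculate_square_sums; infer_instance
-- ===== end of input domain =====

-- B recomputes each window's weighted square sum directly from the array instead of
-- maintaining A's incremental running sums S_1/S_2/S_3 (alternative decomposition, not faster).


-- ===== PORT A =====
def calculate_square_sums (N : Int) (K : Int) (A : List Int) : List Int :=
  let modN : Int := 10 ^ 9 + 7
  let init : Int × Int × Int :=
    (PySem.List.pyRange 0 K).foldl (fun s i =>
      let a := (PySem.List.pyGet? A i).getD 0
      let S3 := PySem.Int.mod (s.2.2 + a) modN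
      let S2 := PySem.Int.mod (s.2.1 + (i + 1) * a) modN
      let S1 := PySem.Int.mod (s.1 + (i + 1) ^ 2 * a) modN
      (S1, S2, S3)) (0, 0, 0)
  let st : Int × Int × Int × List Int :=
    (PySem.List.pyRange 0 (N - K)).foldl (fun s i =>
      let a := (PySem.List.pyGet? A (K + i)).getD 0
      let S1 := PySem.Int.mod (s.1 + (K + 1) ^ 2 * a - 2 * (s.2.1 + (K + 1) * a) + s.2.2.1 + a) modN
      let out := s.2.2.2 ++ [S1]
      let S2 := PySem.Int.mod (s.2.1 + (K + 1) * a - (s.2.2.1 + a)) modN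
      let S3 := PySem.Int.mod (s.2.2.1 + a - (PySem.List.pyGet? A i).getD 0) modN
      (S1, S2, S3, out)) (init.1, init.2.1, init.2.2, [init.1])
  st.2.2.2

-- ===== PORT B =====
def calculate_square_sums_alt (N : Int) (K : Int) (A : List Int) : List Int :=
  let modN : Int := 10 ^ 9 + 7
  let first := PySem.Int.mod
    ((PySem.List.pyRange 0 K).foldl
      (fun acc i => acc + (i + 1) ^ 2 * (PySem.List.pyGet? A i).getD 0) 0) modN
  let output := [first]
  (PySem.List.pyRange 1 (N - K + 1)).foldl (fun out j =>
    out ++ [PySem.Int.mod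
      ((PySem.List.pyRange 0 K).foldl
        (fun acc i => acc + (i + 1) ^ 2 * (PySem.List.pyGet? A (j + i)).getD 0) 0) modN]) output

-- ===== PRECONDITION & SPEC =====
-- Pre_ keeps the calls with K, N within the array that either use a genuine window (0 ≤ K)
-- or do no work at all (N ≤ K): outside it the Python A either raises IndexError or (for a
-- negative K with sliding steps) reads elements through Python's negative-index wraparound,
-- outside the natural domain of the sliding-window task.
def Pre_calculate_square_sums (N : Int) (K : Int) (A : List Int) : Prop :=
  K ≤ (A.length : Int) ∧ N ≤ (A.length : Int) ∧ (0 ≤ K ∨ N ≤ K)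
instance (N : Int) (K : Int) (A : List Int) : Decidable (Pre_calculate_square_sums N K A) := by
  unfold Pre_calculate_square_sums; infer_instance
def pvWitness_calculate_square_sums : Int × Int × List Int := (3, 2, [1, 2, 3])
def Spec_calculate_square_sums (N : Int) (K : Int) (A : List Int) (out : List Int) : Prop := out = calculate_square_sums_alt N K A
instance (N : Int) (K : Int) (A : List Int) (out : List Int) : Decidable (Spec_calculate_square_sums N K A out) := by unfold Spec_calculate_square_sums; infer_instance

-- ===== CLAIM (what is proved, stated in full; the proofs are below) =====
def Claim_equal_calculate_square_sums : Prop := ∀ (N : Int) (K : Int) (A : List Int), Dom_calculate_square_sums N K A → Pre_calculate_square_sums N K A → Spec_calculate_square_sums N K A (calculate_square_sums N K A)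

-- ===== LEMMAS AND PROOFS =====
def pvP : Int := 1000000007

def pvG (A : List Int) (j : Int) : Int := (PySem.List.pyGet? A j).getD 0

def pvW (A : List Int) (k : Nat) (t : Int) : Int :=
  ∑ i ∈ Finset.range k, ((i : Int) + 1) ^ 2 * pvG A (t + i)
def pvV (A : List Int) (k : Nat) (t : Int) : Int :=
  ∑ i ∈ Finset.range k, ((i : Int) + 1) * pvG A (t + i)
def pvU (A : List Int) (k : Nat) (t : Int) : Int :=
  ∑ i ∈ Finset.range k, pvG A (t + i)

lemma pvMC (x : Int) : Int.ModEq pvP (x % pvP) x := Int.emod_emod_of_dvd x dvd_rfl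

lemma pvMod3 (x y z a b c : Int) :
    (x % pvP + a - 2 * (y % pvP + b) + z % pvP + c) % pvP
      = (x + a - 2 * (y + b) + z + c) % pvP :=
  ((((pvMC x).add_right a).sub (((pvMC y).add_right b).mul_left 2)).add (pvMC z)).add_right c

lemma pvMod2 (y z b c : Int) :
    (y % pvP + b - (z % pvP + c)) % pvP = (y + b - (z + c)) % pvP :=
  ((pvMC y).add_right b).sub ((pvMC z).add_right c)

lemma pvMod1 (z c d : Int) :
    (z % pvP + c - d) % pvP = (z + c - d) % pvP :=
  ((pvMC z).add_right c).sub_right d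

lemma pvW_sq (A : List Int) (k : Nat) (t : Int) :
    pvW A k t - 2 * pvV A k t + pvU A k t = ∑ j ∈ Finset.range k, (j : Int) ^ 2 * pvG A (t + j) := by
  unfold pvW pvV pvU
  rw [Finset.mul_sum, ← Finset.sum_sub_distrib, ← Finset.sum_add_distrib]
  exact Finset.sum_congr rfl fun j _ => by ring

lemma pvW_succ (A : List Int) (k : Nat) (t : Int) :
    pvW A k (t + 1) = pvW A k t - 2 * pvV A k t + pvU A k t + (k : Int) ^ 2 * pvG A (t + k) := by
  have h1 : ∑ j ∈ Finset.range (k + 1), (j : Int) ^ 2 * pvG A (t + j) = pvW A k (t + 1) := by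
    rw [Finset.sum_range_succ']
    unfold pvW
    simp only [Nat.cast_zero, Nat.cast_add, Nat.cast_one]
    have hc : ∑ x ∈ Finset.range k, ((x : Int) + 1) ^ 2 * pvG A (t + ((x : Int) + 1))
        = ∑ i ∈ Finset.range k, ((i : Int) + 1) ^ 2 * pvG A (t + 1 + (i : Int)) :=
      Finset.sum_congr rfl (fun j _ => by rw [show t + ((j : Int) + 1) = t + 1 + (j : Int) by ring])
    rw [hc]; ring
  rw [← h1, Finset.sum_range_succ, pvW_sq]

lemma pvV_sq (A : List Int) (k : Nat) (t : Int) :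
    pvV A k t - pvU A k t = ∑ j ∈ Finset.range k, (j : Int) * pvG A (t + j) := by
  unfold pvV pvU
  rw [← Finset.sum_sub_distrib]
  exact Finset.sum_congr rfl fun j _ => by ring

lemma pvV_succ (A : List Int) (k : Nat) (t : Int) :
    pvV A k (t + 1) = pvV A k t - pvU A k t + (k : Int) * pvG A (t + k) := by
  have h1 : ∑ j ∈ Finset.range (k + 1), (j : Int) * pvG A (t + j) = pvV A k (t + 1) := by
    rw [Finset.sum_range_succ']
    unfold pvV
    simp only [Nat.cast_zero, Nat.cast_add, Nat.cast_one]
    have hc : ∑ x ∈ Finset.range k, ((x : Int) + 1) * pvG A (t + ((x : Int) + 1))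
        = ∑ i ∈ Finset.range k, ((i : Int) + 1) * pvG A (t + 1 + (i : Int)) :=
      Finset.sum_congr rfl (fun j _ => by rw [show t + ((j : Int) + 1) = t + 1 + (j : Int) by ring])
    rw [hc]; ring
  rw [← h1, Finset.sum_range_succ, pvV_sq]

lemma pvU_succ (A : List Int) (k : Nat) (t : Int) :
    pvU A k (t + 1) = pvU A k t + pvG A (t + k) - pvG A t := by
  have h1 : ∑ j ∈ Finset.range (k + 1), pvG A (t + j) = pvU A k (t + 1) + pvG A t := by
    rw [Finset.sum_range_succ']
    unfold pvU
    simp only [Nat.cast_zero, Nat.cast_add, Nat.cast_one, add_zero]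
    have hc : ∑ x ∈ Finset.range k, pvG A (t + ((x : Int) + 1))
        = ∑ i ∈ Finset.range k, pvG A (t + 1 + (i : Int)) :=
      Finset.sum_congr rfl (fun j _ => by rw [show t + ((j : Int) + 1) = t + 1 + (j : Int) by ring])
    rw [hc]
  have h2 : ∑ j ∈ Finset.range (k + 1), pvG A (t + j) = pvU A k t + pvG A (t + k) := by
    rw [Finset.sum_range_succ]; rfl
  omega

lemma pvModFold {α : Type} (l : List α) (f : α → Int) (a : Int) :
    l.foldl (fun s i => PySem.Int.mod (s + f i) pvP) (a % pvP) = (a + (l.map f).sum) % pvP := by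
  induction l generalizing a with
  | nil => simp
  | cons h t ih =>
    simp only [List.foldl_cons, List.map_cons, List.sum_cons]
    rw [PySem.Int.mod_eq_emod_of_pos (by norm_num [pvP]), Int.emod_add_emod, ih (a + f h)]
    ring_nf

lemma pvSumRange (k : Nat) (f : Int → Int) :
    ((List.range k).map (fun (i : Nat) => f (i : Int))).sum = ∑ i ∈ Finset.range k, f (i : Int) := by
  induction k with
  | zero => simp
  | succ n ih =>
    rw [List.range_succ, List.map_append, List.sum_append, Finset.sum_range_succ, ih]
    simp

lemma pvRangeOne (m : Nat) :
    PySem.List.pyRange 1 ((m : Int) + 1) = (List.range m).map (fun (t : Nat) => (t : Int) + 1) := by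
  induction m with
  | zero => decide
  | succ n ih =>
    have h : ((n + 1 : Nat) : Int) + 1 = ((n : Int) + 1) + 1 := by push_cast; ring
    rw [h, PySem.List.pyRange_one_succ_right (by omega : (1:Int) ≤ (n:Int)+1), ih, List.range_succ]
    simp

lemma pvModFold0 {α : Type} (l : List α) (f : α → Int) :
    l.foldl (fun s i => PySem.Int.mod (s + f i) pvP) 0 = (l.map f).sum % pvP := by
  simpa using pvModFold l f 0

lemma pvSumCast (k : Nat) (f : Int → Int) :
    (((List.range k).map (fun (i : Nat) => (i : Int))).map f).sum = ∑ i ∈ Finset.range k, f (i : Int) := by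
  rw [List.map_map]
  simpa [Function.comp] using pvSumRange k f

lemma pvW0 (A : List Int) (k : Nat) :
    pvW A k 0 = ∑ i ∈ Finset.range k, ((i : Int) + 1) ^ 2 * pvG A (i : Int) := by
  unfold pvW; exact Finset.sum_congr rfl fun i _ => by rw [zero_add]

lemma pvV0 (A : List Int) (k : Nat) :
    pvV A k 0 = ∑ i ∈ Finset.range k, ((i : Int) + 1) * pvG A (i : Int) := by
  unfold pvV; exact Finset.sum_congr rfl fun i _ => by rw [zero_add]

lemma pvU0 (A : List Int) (k : Nat) :
    pvU A k 0 = ∑ i ∈ Finset.range k, pvG A (i : Int) := by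
  unfold pvU; exact Finset.sum_congr rfl fun i _ => by rw [zero_add]

-- A's first loop: the three mod-accumulators are the three window sums of window 0, reduced mod p.
lemma pvAFirst (A : List Int) (k : Nat) :
    (PySem.List.pyRange 0 (k : Int)).foldl (fun (s : Int × Int × Int) i =>
        (PySem.Int.mod (s.1 + (i + 1) ^ 2 * (PySem.List.pyGet? A i).getD 0) pvP,
         PySem.Int.mod (s.2.1 + (i + 1) * (PySem.List.pyGet? A i).getD 0) pvP,
         PySem.Int.mod (s.2.2 + (PySem.List.pyGet? A i).getD 0) pvP)) (0, 0, 0)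
      = (pvW A k 0 % pvP, pvV A k 0 % pvP, pvU A k 0 % pvP) := by
  rw [PySem.List.pyRange_zero_natCast]
  rw [PySem.List.foldl_prod_mk
      (f := fun (s1 : Int) i => PySem.Int.mod (s1 + (i + 1) ^ 2 * (PySem.List.pyGet? A i).getD 0) pvP)
      (g := fun (s : Int × Int) i =>
        (PySem.Int.mod (s.1 + (i + 1) * (PySem.List.pyGet? A i).getD 0) pvP,
         PySem.Int.mod (s.2 + (PySem.List.pyGet? A i).getD 0) pvP))]
  rw [PySem.List.foldl_prod_mk
      (f := fun (s2 : Int) i => PySem.Int.mod (s2 + (i + 1) * (PySem.List.pyGet? A i).getD 0) pvP)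
      (g := fun (s3 : Int) i => PySem.Int.mod (s3 + (PySem.List.pyGet? A i).getD 0) pvP)]
  rw [pvModFold0 _ (fun i => (i + 1) ^ 2 * (PySem.List.pyGet? A i).getD 0),
      pvModFold0 _ (fun i => (i + 1) * (PySem.List.pyGet? A i).getD 0),
      pvModFold0 _ (fun i => (PySem.List.pyGet? A i).getD 0),
      pvSumCast, pvSumCast, pvSumCast, pvW0, pvV0, pvU0]
  rfl

-- A's sliding loop maintains (W t % p, V t % p, U t % p) and the list of W's mod p.
lemma pvALoop (A : List Int) (k m : Nat) :
    (PySem.List.pyRange 0 (m : Int)).foldl (fun (s : Int × Int × Int × List Int) i =>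
        (PySem.Int.mod (s.1 + ((k : Int) + 1) ^ 2 * (PySem.List.pyGet? A ((k : Int) + i)).getD 0
            - 2 * (s.2.1 + ((k : Int) + 1) * (PySem.List.pyGet? A ((k : Int) + i)).getD 0)
            + s.2.2.1 + (PySem.List.pyGet? A ((k : Int) + i)).getD 0) pvP,
         PySem.Int.mod (s.2.1 + ((k : Int) + 1) * (PySem.List.pyGet? A ((k : Int) + i)).getD 0
            - (s.2.2.1 + (PySem.List.pyGet? A ((k : Int) + i)).getD 0)) pvP,
         PySem.Int.mod (s.2.2.1 + (PySem.List.pyGet? A ((k : Int) + i)).getD 0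
            - (PySem.List.pyGet? A i).getD 0) pvP,
         s.2.2.2 ++ [PySem.Int.mod (s.1 + ((k : Int) + 1) ^ 2 * (PySem.List.pyGet? A ((k : Int) + i)).getD 0
            - 2 * (s.2.1 + ((k : Int) + 1) * (PySem.List.pyGet? A ((k : Int) + i)).getD 0)
            + s.2.2.1 + (PySem.List.pyGet? A ((k : Int) + i)).getD 0) pvP]))
      (pvW A k 0 % pvP, pvV A k 0 % pvP, pvU A k 0 % pvP, [pvW A k 0 % pvP])
      = (pvW A k (m : Int) % pvP, pvV A k (m : Int) % pvP, pvU A k (m : Int) % pvP,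
         (List.range (m + 1)).map (fun (t : Nat) => pvW A k (t : Int) % pvP)) := by
  induction m with
  | zero => simp [PySem.List.pyRange_one_eq_nil (by omega : (0:Int) ≤ 0)]
  | succ m ih =>
    have hc : ((m + 1 : Nat) : Int) = (m : Int) + 1 := by push_cast; ring
    rw [hc, PySem.List.pyRange_one_succ_right (Int.natCast_nonneg m), List.foldl_append, ih,
        List.foldl_cons, List.foldl_nil]
    have hmod : (0 : Int) < pvP := by norm_num [pvP]
    have ha : (PySem.List.pyGet? A ((k : Int) + (m : Int))).getD 0 = pvG A ((m : Int) + (k : Int)) := by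
      rw [show (k : Int) + (m : Int) = (m : Int) + (k : Int) by ring]; rfl
    have hg : (PySem.List.pyGet? A (m : Int)).getD 0 = pvG A (m : Int) := rfl
    have hS1 : PySem.Int.mod (pvW A k (m : Int) % pvP
          + ((k : Int) + 1) ^ 2 * (PySem.List.pyGet? A ((k : Int) + (m : Int))).getD 0
          - 2 * (pvV A k (m : Int) % pvP + ((k : Int) + 1) * (PySem.List.pyGet? A ((k : Int) + (m : Int))).getD 0)
          + pvU A k (m : Int) % pvP + (PySem.List.pyGet? A ((k : Int) + (m : Int))).getD 0) pvP
        = pvW A k ((m : Int) + 1) % pvP := by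
      rw [ha, PySem.Int.mod_eq_emod_of_pos hmod]
      calc (pvW A k (m : Int) % pvP + ((k : Int) + 1) ^ 2 * pvG A ((m : Int) + (k : Int))
              - 2 * (pvV A k (m : Int) % pvP + ((k : Int) + 1) * pvG A ((m : Int) + (k : Int)))
              + pvU A k (m : Int) % pvP + pvG A ((m : Int) + (k : Int))) % pvP
          = (pvW A k (m : Int) + ((k : Int) + 1) ^ 2 * pvG A ((m : Int) + (k : Int))
              - 2 * (pvV A k (m : Int) + ((k : Int) + 1) * pvG A ((m : Int) + (k : Int)))
              + pvU A k (m : Int) + pvG A ((m : Int) + (k : Int))) % pvP := pvMod3 _ _ _ _ _ _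
        _ = pvW A k ((m : Int) + 1) % pvP := by rw [pvW_succ]; ring_nf
    have hS2 : PySem.Int.mod (pvV A k (m : Int) % pvP
          + ((k : Int) + 1) * (PySem.List.pyGet? A ((k : Int) + (m : Int))).getD 0
          - (pvU A k (m : Int) % pvP + (PySem.List.pyGet? A ((k : Int) + (m : Int))).getD 0)) pvP
        = pvV A k ((m : Int) + 1) % pvP := by
      rw [ha, PySem.Int.mod_eq_emod_of_pos hmod, pvMod2, pvV_succ]; ring_nf
    have hS3 : PySem.Int.mod (pvU A k (m : Int) % pvP
          + (PySem.List.pyGet? A ((k : Int) + (m : Int))).getD 0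
          - (PySem.List.pyGet? A (m : Int)).getD 0) pvP
        = pvU A k ((m : Int) + 1) % pvP := by
      rw [ha, hg, PySem.Int.mod_eq_emod_of_pos hmod, pvMod1, pvU_succ]
    simp only [Prod.mk.injEq]
    refine ⟨hS1, hS2, hS3, ?_⟩
    rw [hS1, List.range_succ (n := m + 1), List.map_append]
    simp [hc]

-- B's window sum at offset j is W j, reduced mod p.
lemma pvBWin (A : List Int) (k : Nat) (j : Int) :
    PySem.Int.mod ((PySem.List.pyRange 0 (k : Int)).foldl
        (fun acc i => acc + (i + 1) ^ 2 * (PySem.List.pyGet? A (j + i)).getD 0) 0) pvP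
      = pvW A k j % pvP := by
  rw [PySem.List.pyRange_zero_natCast, PySem.List.foldl_add, zero_add,
      pvSumCast k (fun i => (i + 1) ^ 2 * (PySem.List.pyGet? A (j + i)).getD 0),
      PySem.Int.mod_eq_emod_of_pos (by norm_num [pvP])]
  rfl

lemma pvBFirst (A : List Int) (k : Nat) :
    PySem.Int.mod ((PySem.List.pyRange 0 (k : Int)).foldl
        (fun acc i => acc + (i + 1) ^ 2 * (PySem.List.pyGet? A i).getD 0) 0) pvP
      = pvW A k 0 % pvP := by
  rw [PySem.List.pyRange_zero_natCast, PySem.List.foldl_add, zero_add,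
      pvSumCast k (fun i => (i + 1) ^ 2 * (PySem.List.pyGet? A i).getD 0),
      PySem.Int.mod_eq_emod_of_pos (by norm_num [pvP]), pvW0]
  rfl

-- ===== VERDICT (by name: the statement is the Claim_ definition above) =====
theorem calculate_square_sums_spec : Claim_equal_calculate_square_sums := by
  intro N K A _ hPre
  obtain ⟨hKA, hNA, hOr⟩ := hPre
  unfold Spec_calculate_square_sums
  have hP : ((10 : Int) ^ 9 + 7) = pvP := by norm_num [pvP]
  by_cases hK : 0 ≤ K
  case neg =>
    -- degenerate call: K < 0 and N ≤ K, both loops are empty and both sides return [0]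
    have hNK : N ≤ K := hOr.resolve_left hK
    simp only [calculate_square_sums, calculate_square_sums_alt, hP]
    rw [PySem.List.pyRange_one_eq_nil (by omega : K ≤ 0),
        PySem.List.pyRange_one_eq_nil (by omega : N - K ≤ 0),
        PySem.List.pyRange_one_eq_nil (by omega : N - K + 1 ≤ 1)]
    simp only [List.foldl_nil]
    decide
  obtain ⟨k, rfl⟩ := Int.eq_ofNat_of_zero_le hK
  simp only [calculate_square_sums, calculate_square_sums_alt, hP]
  rw [pvAFirst A k]
  rw [PySem.List.foldl_append_singleton_eq_map]
  by_cases h : 0 ≤ N - (k : Int)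
  · obtain ⟨m, hm⟩ := Int.eq_ofNat_of_zero_le h
    rw [hm]
    rw [show (pvW A k 0 % pvP, pvV A k 0 % pvP, pvU A k 0 % pvP).1 = pvW A k 0 % pvP from rfl]
    rw [pvALoop A k m, pvRangeOne m, List.map_map]
    rw [List.range_succ_eq_map, List.map_cons, List.map_map]
    simp only [Nat.cast_zero, List.singleton_append]
    rw [pvBFirst A k]
    congr 1
    refine List.map_congr_left fun t _ => ?_
    simp only [Function.comp]
    rw [pvBWin A k ((t : Int) + 1)]
    push_cast
    ring_nf
  · rw [PySem.List.pyRange_one_eq_nil (by omega : N - (k : Int) ≤ 0),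
        PySem.List.pyRange_one_eq_nil (by omega : N - (k : Int) + 1 ≤ 1)]
    simp [pvBFirst A k]
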